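-- pv_equiv track=rewrite | github.com/XuehaoSun/test-azure | scripts/utils/dataset_shrink/imagenetRaw_shrink.py | shrink_dataset
-- ===== SOURCE A (Python) =====
-- def shrink_dataset(dataset_location, destination, images_info, images_per_class):
--
--     shrinked_images_info = {}
--     shrinked_images_by_class = {}
--     for image, img_class in images_info.items():
--         class_samples = len(shrinked_images_by_class.get(img_class, []))
--         if class_samples >= images_per_class:
--             continue
--         if img_class not in shrinked_images_by_class:
--             shrinked_images_by_class.update({img_class: []})
--         shrinked_images_by_class.get(img_class).append(image)
--         shrinked_images_info.update({image: img_class})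
--
--     return shrinked_images_info
-- ===== SOURCE B (Python) =====
-- def shrink_dataset(dataset_location, destination, images_info, images_per_class):
--     groups = {}
--     for image, img_class in images_info.items():
--         groups.setdefault(img_class, []).append(image)
--     limit = max(0, images_per_class)
--     keep = {image for images in groups.values() for image in images[:limit]}
--     return {image: img_class for image, img_class in images_info.items()
--             if image in keep}
-- ===== Notes on version B (the rewrite author's own statement) =====
-- stated objective: alternative
-- what changed: A's single interleaved pass with a running per-class sample count and early continue is replaced by a group-then-select structure: one pass groups images by class, a keep-set takes each class's first max(0, images_per_class) images, and a final filtering pass over the original dict rebuilds the result (same insertion order).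
import Mathlib
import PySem

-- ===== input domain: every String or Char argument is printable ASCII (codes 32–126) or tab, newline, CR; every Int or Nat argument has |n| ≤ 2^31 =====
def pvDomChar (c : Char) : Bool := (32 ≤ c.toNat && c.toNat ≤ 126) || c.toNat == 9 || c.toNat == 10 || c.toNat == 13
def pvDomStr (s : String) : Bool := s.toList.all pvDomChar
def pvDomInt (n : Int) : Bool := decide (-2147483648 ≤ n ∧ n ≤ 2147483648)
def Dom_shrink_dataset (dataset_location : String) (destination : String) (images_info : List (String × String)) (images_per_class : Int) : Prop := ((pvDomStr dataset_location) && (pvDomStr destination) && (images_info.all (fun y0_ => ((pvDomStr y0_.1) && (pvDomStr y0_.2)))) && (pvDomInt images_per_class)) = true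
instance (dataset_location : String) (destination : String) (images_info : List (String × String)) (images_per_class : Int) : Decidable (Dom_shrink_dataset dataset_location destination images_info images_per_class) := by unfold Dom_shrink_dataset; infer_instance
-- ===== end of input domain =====

-- B replaces A's single interleaved counting pass by a group-by-class / take-first-max(0,n) / filter-the-original decomposition (objective: alternative, same cost).

-- ===== PORT A =====
-- one loop iteration of A: state = (shrinked_images_info, shrinked_images_by_class)
def shrinkStepA (images_per_class : Int)
    (s : PySem.Dict String String × PySem.Dict String (List String))
    (p : String × String) :
    PySem.Dict String String × PySem.Dict String (List String) :=
  let class_samples : Int := ((s.2.getD p.2 []).length : Int)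
  if images_per_class ≤ class_samples then s
  else
    let byClass := if s.2.contains p.2 then s.2 else s.2.insert p.2 []
    let byClass := byClass.modify p.2 [] (fun l => l ++ [p.1])
    (s.1.insert p.1 p.2, byClass)

def shrink_dataset (dataset_location : String) (destination : String) (images_info : List (String × String)) (images_per_class : Int) : List (String × String) :=
  (images_info.foldl (shrinkStepA images_per_class) (PySem.Dict.empty, PySem.Dict.empty)).1.items

-- ===== PORT B =====
def shrink_dataset_alt (dataset_location : String) (destination : String) (images_info : List (String × String)) (images_per_class : Int) : List (String × String) :=
  -- groups.setdefault(img_class, []).append(image), i.e. groups[c] = groups.get(c, []) + [image]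
  let groups := images_info.foldl
    (fun (d : PySem.Dict String (List String)) p => d.modify p.2 [] (fun l => l ++ [p.1]))
    PySem.Dict.empty
  let limit : Int := max 0 images_per_class
  let keep : PySem.Set String :=
    PySem.Set.ofList (groups.values.flatMap (fun imgs => PySem.List.slice imgs none (some limit)))
  (images_info.foldl
    (fun (d : PySem.Dict String String) p => if keep.contains p.1 then d.insert p.1 p.2 else d)
    PySem.Dict.empty).items

-- ===== PRECONDITION & SPEC =====
-- images_info is a Python dict, so its keys are necessarily distinct; Pre_ states exactly that
-- (an association list with duplicate keys does not represent any dict argument A can receive).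
def Pre_shrink_dataset (dataset_location : String) (destination : String) (images_info : List (String × String)) (images_per_class : Int) : Prop :=
  (images_info.map Prod.fst).Nodup
instance (dataset_location : String) (destination : String) (images_info : List (String × String)) (images_per_class : Int) : Decidable (Pre_shrink_dataset dataset_location destination images_info images_per_class) := by unfold Pre_shrink_dataset; infer_instance

def pvWitness_shrink_dataset : String × String × (List (String × String)) × Int :=
  ("loc", "dst", [("a", "x"), ("b", "x"), ("c", "y")], 1)

def Spec_shrink_dataset (dataset_location : String) (destination : String) (images_info : List (String × String)) (images_per_class : Int) (out : List (String × String)) : Prop := out = shrink_dataset_alt dataset_location destination images_info images_per_class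
instance (dataset_location : String) (destination : String) (images_info : List (String × String)) (images_per_class : Int) (out : List (String × String)) : Decidable (Spec_shrink_dataset dataset_location destination images_info images_per_class out) := by unfold Spec_shrink_dataset; infer_instance

-- ===== CLAIM (what is proved, stated in full; the proofs are below) =====
def Claim_equal_shrink_dataset : Prop := ∀ (dataset_location : String) (destination : String) (images_info : List (String × String)) (images_per_class : Int), Dom_shrink_dataset dataset_location destination images_info images_per_class → Pre_shrink_dataset dataset_location destination images_info images_per_class → Spec_shrink_dataset dataset_location destination images_info images_per_class (shrink_dataset dataset_location destination images_info images_per_class)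

-- ===== LEMMAS AND PROOFS =====

-- the common reference function both ports are reduced to: keep an entry iff fewer than
-- images_per_class entries of its class came before; cnt counts ALL previously seen entries per class
def pvPick (ipc : Int) : List (String × String) → PySem.Dict String Int → List (String × String)
  | [], _ => []
  | p :: t, cnt =>
      if ipc ≤ cnt.getD p.2 0 then pvPick ipc t (cnt.modify p.2 0 (· + 1))
      else p :: pvPick ipc t (cnt.modify p.2 0 (· + 1))

-- images of class c, in order
def pvImgsFor (l : List (String × String)) (c : String) : List String :=
  (l.filter (fun p => p.2 == c)).map Prod.fst

-- the list B builds its keep-set from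
def pvKeepList (full : List (String × String)) (ipc : Int) : List String :=
  ((full.foldl (fun (d : PySem.Dict String (List String)) p => d.modify p.2 [] (fun l => l ++ [p.1]))
      PySem.Dict.empty).values).flatMap
    (fun imgs => PySem.List.slice imgs none (some (max 0 ipc)))

lemma A_loop (ipc : Int) (l : List (String × String)) (info : PySem.Dict String String)
    (byc : PySem.Dict String (List String)) (cnt : PySem.Dict String Int)
    (hnd : (l.map Prod.fst).Nodup)
    (hfresh : ∀ p ∈ l, info.contains p.1 = false)
    (hcnt : ∀ c, 0 ≤ cnt.getD c 0 ∧ ((byc.getD c []).length : Int) = min (cnt.getD c 0) (max ipc 0)) :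
    (l.foldl (shrinkStepA ipc) (info, byc)).1.items = info.items ++ pvPick ipc l cnt := by
  induction l generalizing info byc cnt with
  | nil => simp [pvPick]
  | cons p t ih =>
    simp only [List.map_cons, List.nodup_cons] at hnd
    obtain ⟨hp1, hndt⟩ := hnd
    obtain ⟨hc0, hlen⟩ := hcnt p.2
    simp only [List.foldl_cons, pvPick]
    by_cases h : ipc ≤ ((byc.getD p.2 []).length : Int)
    · have hcond : ipc ≤ cnt.getD p.2 0 := by omega
      rw [if_pos hcond]
      have hstep : shrinkStepA ipc (info, byc) p = (info, byc) := by
        simp [shrinkStepA, h]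
      rw [hstep]
      refine ih info byc _ hndt (fun q hq => hfresh q (List.mem_cons_of_mem _ hq)) ?_
      intro c
      obtain ⟨hc0', hlen'⟩ := hcnt c
      rw [PySem.Dict.getD_modify]
      split_ifs with hceq
      · subst hceq; constructor <;> omega
      · exact ⟨hc0', hlen'⟩
    · have hcond : ¬ ipc ≤ cnt.getD p.2 0 := by omega
      rw [if_neg hcond]
      have hstep : shrinkStepA ipc (info, byc) p
          = (info.insert p.1 p.2,
             (if byc.contains p.2 then byc else byc.insert p.2 []).modify p.2 [] (fun l => l ++ [p.1])) := by
        simp [shrinkStepA, h]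
      rw [hstep]
      have hbase : (if byc.contains p.2 then byc else byc.insert p.2 []).getD p.2 [] = byc.getD p.2 [] := by
        by_cases hcon : byc.contains p.2 = true
        · rw [if_pos hcon]
        · rw [if_neg hcon, PySem.Dict.getD_insert_self,
            PySem.Dict.getD_of_not_contains _ _ (by simpa using hcon)]
      have hrec := ih (info.insert p.1 p.2)
        ((if byc.contains p.2 then byc else byc.insert p.2 []).modify p.2 [] (fun l => l ++ [p.1]))
        (cnt.modify p.2 0 (· + 1)) hndt ?_ ?_
      · rw [hrec, PySem.Dict.items_insert_of_not_contains _ _ (hfresh p (List.mem_cons_self))]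
        simp
      · intro q hq
        rw [PySem.Dict.contains_insert]
        have : q.1 ≠ p.1 := by
          intro he; exact hp1 (List.mem_map.mpr ⟨q, hq, he⟩)
        simp [this, hfresh q (List.mem_cons_of_mem _ hq)]
      · intro c
        obtain ⟨hc0', hlen'⟩ := hcnt c
        rw [PySem.Dict.getD_modify, PySem.Dict.getD_modify]
        by_cases hceq : c = p.2
        · rw [if_pos hceq, if_pos hceq]
          subst hceq
          rw [hbase]
          simp only [List.length_append, List.length_singleton]
          constructor <;> push_cast <;> omega
        · rw [if_neg hceq, if_neg hceq]
          have hbase' : (if byc.contains p.2 then byc else byc.insert p.2 []).getD c [] = byc.getD c [] := by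
            by_cases hcon : byc.contains p.2 = true
            · rw [if_pos hcon]
            · rw [if_neg hcon]
              exact PySem.Dict.getD_insert_of_ne _ _ _ hceq
          rw [hbase']
          exact ⟨hc0', hlen'⟩

lemma A_eq_pick (dl ds : String) (full : List (String × String)) (ipc : Int)
    (hnd : (full.map Prod.fst).Nodup) :
    shrink_dataset dl ds full ipc = pvPick ipc full PySem.Dict.empty := by
  unfold shrink_dataset
  have h2 : ∀ c : String, 0 ≤ (PySem.Dict.empty : PySem.Dict String Int).getD c 0 ∧
      (((PySem.Dict.empty : PySem.Dict String (List String)).getD c []).length : Int)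
        = min ((PySem.Dict.empty : PySem.Dict String Int).getD c 0) (max ipc 0) := by
    intro c
    rw [PySem.Dict.getD_empty, PySem.Dict.getD_empty]
    refine ⟨by omega, by simp⟩
  rw [A_loop ipc full PySem.Dict.empty PySem.Dict.empty PySem.Dict.empty hnd
      (fun p _ => PySem.Dict.contains_empty p.1) h2]
  rfl

lemma groups_getD (full : List (String × String)) (c : String) :
    (full.foldl (fun (d : PySem.Dict String (List String)) p => d.modify p.2 [] (fun l => l ++ [p.1]))
      PySem.Dict.empty).getD c [] = pvImgsFor full c := by
  have hswap : full.foldl (fun (d : PySem.Dict String (List String)) p => d.modify p.2 [] (fun l => l ++ [p.1]))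
      PySem.Dict.empty
      = (full.map Prod.swap).foldl (fun (d : PySem.Dict String (List String)) q => d.modify q.1 [] (fun l => l ++ [q.2]))
      PySem.Dict.empty := by
    rw [List.foldl_map]
    rfl
  rw [hswap, PySem.Dict.getD_foldl_modify_append]
  simp [pvImgsFor, List.filter_map, Function.comp_def]

lemma groups_keys (full : List (String × String)) :
    (full.foldl (fun (d : PySem.Dict String (List String)) p => d.modify p.2 [] (fun l => l ++ [p.1]))
      PySem.Dict.empty).keys = PySem.Set.ofList (full.map Prod.snd) := by
  rw [PySem.Dict.keys_foldl_modify_key full Prod.snd [] (fun _ p l => l ++ [p.1])]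
  rw [PySem.Dict.keys_empty]
  rfl

lemma keepList_eq (full : List (String × String)) (ipc : Int) :
    pvKeepList full ipc
      = (PySem.Set.ofList (full.map Prod.snd)).flatMap
          (fun c => (pvImgsFor full c).take (max 0 ipc).toNat) := by
  unfold pvKeepList
  rw [PySem.Dict.values_eq_map_keys _ ?hnd []]
  case hnd =>
    exact PySem.Dict.nodup_keys_foldl_modify_key full Prod.snd [] (fun _ p l => l ++ [p.1])
      PySem.Dict.empty (by rw [PySem.Dict.keys_empty]; exact List.nodup_nil)
  rw [groups_keys, List.flatMap_map]
  simp only [groups_getD, PySem.List.slice_to _ (le_max_left 0 ipc)]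

lemma mem_take_append {x : String} {A B : List String} {n : Nat} (hA : x ∉ A) :
    x ∈ (A ++ x :: B).take n ↔ A.length < n := by
  constructor
  · intro h
    by_contra hn
    rw [List.take_append_of_le_length (by omega)] at h
    exact hA (List.mem_of_mem_take h)
  · intro h
    rw [List.take_append]
    refine List.mem_append_right _ ?_
    obtain ⟨k, hk⟩ : ∃ k, n - A.length = k + 1 := ⟨n - A.length - 1, by omega⟩
    rw [hk, List.take_succ_cons]
    exact List.mem_cons_self

lemma imgsFor_split (pre post : List (String × String)) (p : String × String) :
    pvImgsFor (pre ++ p :: post) p.2 = pvImgsFor pre p.2 ++ p.1 :: pvImgsFor post p.2 := by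
  simp [pvImgsFor, List.filter_append]

lemma imgsFor_length (pre : List (String × String)) (c : String) :
    (pvImgsFor pre c).length = (pre.map Prod.snd).count c := by
  simp only [pvImgsFor, List.length_map, ← List.countP_eq_length_filter]
  rw [List.count, List.countP_map]
  rfl

lemma mem_keepList (ipc : Int) (pre post : List (String × String)) (p : String × String)
    (hnd : (((pre ++ p :: post)).map Prod.fst).Nodup) :
    p.1 ∈ pvKeepList (pre ++ p :: post) ipc ↔ (((pre.map Prod.snd).count p.2 : Int) < ipc) := by
  have hmem : p ∈ pre ++ p :: post := List.mem_append_right _ List.mem_cons_self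
  have hnd' := hnd
  rw [List.map_append, List.map_cons, List.nodup_append] at hnd'
  obtain ⟨-, -, hdisj⟩ := hnd'
  have hpre1 : p.1 ∉ pre.map Prod.fst := fun hin =>
    (hdisj _ hin p.1 List.mem_cons_self) rfl
  have hAnot : p.1 ∉ pvImgsFor pre p.2 := by
    intro hin
    obtain ⟨q, hq, hq1⟩ := List.mem_map.mp hin
    exact hpre1 (List.mem_map.mpr ⟨q, (List.mem_filter.mp hq).1, hq1⟩)
  rw [keepList_eq]
  constructor
  · intro h
    obtain ⟨c, _, hm⟩ := List.mem_flatMap.mp h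
    have hpc : c = p.2 := by
      have := List.mem_of_mem_take hm
      obtain ⟨q, hq, hq1⟩ := List.mem_map.mp this
      obtain ⟨hqmem, hqc⟩ := List.mem_filter.mp hq
      have hqp : q = p := List.inj_on_of_nodup_map hnd hqmem hmem hq1
      subst hqp
      exact (beq_iff_eq.mp hqc).symm
    subst hpc
    rw [imgsFor_split, mem_take_append hAnot] at hm
    rw [imgsFor_length] at hm
    omega
  · intro h
    refine List.mem_flatMap.mpr ⟨p.2, ?_, ?_⟩
    · exact (PySem.Set.mem_ofList _ _).mpr (List.mem_map.mpr ⟨p, hmem, rfl⟩)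
    · rw [imgsFor_split, mem_take_append hAnot, imgsFor_length]
      omega


lemma B_filter_eq_pick (ipc : Int) (full : List (String × String))
    (hnd : (full.map Prod.fst).Nodup) :
    ∀ (pre l : List (String × String)), full = pre ++ l →
      l.filter (fun p => decide (p.1 ∈ pvKeepList full ipc))
        = pvPick ipc l (PySem.Dict.counter (pre.map Prod.snd)) := by
  intro pre l
  induction l generalizing pre with
  | nil => intro _; rfl
  | cons p t ih =>
    intro hfull
    subst hfull
    have hmem : p.1 ∈ pvKeepList (pre ++ p :: t) ipc ↔ (((pre.map Prod.snd).count p.2 : Int) < ipc) :=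
      mem_keepList ipc pre t p hnd
    have hcnt : (PySem.Dict.counter (pre.map Prod.snd)).getD p.2 0 = ((pre.map Prod.snd).count p.2 : Int) :=
      PySem.Dict.getD_counter _ _
    have hrec := ih (pre ++ [p]) (by simp)
    have hctr : PySem.Dict.counter ((pre ++ [p]).map Prod.snd)
        = (PySem.Dict.counter (pre.map Prod.snd)).modify p.2 0 (· + 1) := by
      rw [List.map_append]
      exact PySem.Dict.counter_append_singleton _ _
    rw [hctr] at hrec
    rw [List.filter_cons, pvPick]
    by_cases h : ipc ≤ (PySem.Dict.counter (pre.map Prod.snd)).getD p.2 0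
    · rw [if_pos h]
      have : ¬ p.1 ∈ pvKeepList (pre ++ p :: t) ipc := by
        rw [hmem]; omega
      simp only [this, decide_false]
      simpa using hrec
    · rw [if_neg h]
      have : p.1 ∈ pvKeepList (pre ++ p :: t) ipc := by
        rw [hmem]; omega
      simp only [this, decide_true, if_true]
      rw [hrec]

lemma B_eq_pick (dl ds : String) (full : List (String × String)) (ipc : Int)
    (hnd : (full.map Prod.fst).Nodup) :
    shrink_dataset_alt dl ds full ipc = pvPick ipc full PySem.Dict.empty := by
  have h1 : shrink_dataset_alt dl ds full ipc
      = (full.foldl (fun (d : PySem.Dict String String) p =>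
          if (PySem.Set.ofList (pvKeepList full ipc)).contains p.1 then d.insert p.1 p.2 else d)
          PySem.Dict.empty).items := rfl
  rw [h1]
  have h2 : (fun (d : PySem.Dict String String) (p : String × String) =>
        if (PySem.Set.ofList (pvKeepList full ipc)).contains p.1 then d.insert p.1 p.2 else d)
      = (fun (d : PySem.Dict String String) (p : String × String) =>
        if decide (p.1 ∈ pvKeepList full ipc) then d.insert p.1 p.2 else d) := by
    funext d p
    congr 1
    simp [PySem.Set.contains, PySem.Set.mem_ofList]
  rw [h2]
  have hf := PySem.List.foldl_if_eq_foldl_filter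
    (fun (q : String × String) => decide (q.1 ∈ pvKeepList full ipc))
    (fun (d : PySem.Dict String String) q => d.insert q.1 q.2) full PySem.Dict.empty
  simp only [hf]
  have hsub : ((full.filter (fun p => decide (p.1 ∈ pvKeepList full ipc))).map Prod.fst).Nodup :=
    hnd.sublist (List.Sublist.map Prod.fst List.filter_sublist)
  rw [PySem.Dict.items_foldl_insert_fresh _ Prod.fst Prod.snd PySem.Dict.empty
      (fun a _ => PySem.Dict.contains_empty a.1) hsub]
  have h3 := B_filter_eq_pick ipc full hnd [] full rfl
  simp only [List.map_nil] at h3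
  have h5 : (PySem.Dict.empty : PySem.Dict String String).items = [] := rfl
  rw [h5, List.nil_append]
  have h6 : List.map (fun a : String × String => (a.1, a.2))
      (List.filter (fun p => decide (p.1 ∈ pvKeepList full ipc)) full)
      = List.filter (fun p => decide (p.1 ∈ pvKeepList full ipc)) full := by
    simp
  rw [h6, h3]
  rfl

-- ===== VERDICT (by name: the statement is the Claim_ definition above) =====
theorem shrink_dataset_spec : Claim_equal_shrink_dataset := by
  intro dl ds full ipc _hdom hpre
  unfold Spec_shrink_dataset
  rw [A_eq_pick dl ds full ipc hpre, B_eq_pick dl ds full ipc hpre]
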